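-- pv_equiv track=rewrite | github.com/mirelesDavid/TextProcessingApp | Algorithms/manacherAlg.py | preprocessTextWithMapping
-- ===== SOURCE A (Python) =====
-- def preprocessTextWithMapping(inputString):
--     normalizedString = ''
--     indexMapping = []
--
--     for i, char in enumerate(inputString):
--         if char.isalnum():
--             normalizedString += char.lower()
--             indexMapping.append(i)
--
--     return normalizedString, indexMapping
-- ===== SOURCE B (Python) =====
-- def preprocessTextWithMapping(inputString):
--     # Divide and conquer: split the string at midpoints, solve halves, concatenate.
--     def go(lo, hi):
--         if lo >= hi:
--             return '', []
--         if hi - lo == 1: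
--             c = inputString[lo]
--             if c.isalnum():
--                 return c.lower(), [lo]
--             return '', []
--         mid = (lo + hi) // 2
--         left = go(lo, mid)
--         right = go(mid, hi)
--         return left[0] + right[0], left[1] + right[1]
--     return go(0, len(inputString))
-- ===== Notes on version B (the rewrite author's own statement) =====
-- stated objective: alternative
-- what changed: B replaces A's single left-to-right accumulating loop with a divide-and-conquer recursion that splits the index range at the midpoint, solves both halves independently and concatenates the results.
import Mathlib
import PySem

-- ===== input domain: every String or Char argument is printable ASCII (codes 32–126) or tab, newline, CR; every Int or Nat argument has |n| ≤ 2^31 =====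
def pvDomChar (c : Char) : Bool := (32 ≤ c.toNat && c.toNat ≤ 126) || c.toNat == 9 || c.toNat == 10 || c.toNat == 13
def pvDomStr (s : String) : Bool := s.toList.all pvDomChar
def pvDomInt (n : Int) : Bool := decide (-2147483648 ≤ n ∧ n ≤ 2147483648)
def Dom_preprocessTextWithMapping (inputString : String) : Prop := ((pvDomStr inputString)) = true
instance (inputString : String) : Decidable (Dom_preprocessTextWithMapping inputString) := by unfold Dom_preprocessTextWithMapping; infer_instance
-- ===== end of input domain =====

-- B replaces A's single accumulating loop by a divide-and-conquer recursion that splits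
-- the index range at the midpoint and concatenates the half-results; objective: alternative.

-- ===== PORT A =====
-- A: one fused loop over enumerate(inputString), accumulating both outputs.
def preprocessTextWithMapping (inputString : String) : String × List Int :=
  let r := (PySem.List.enumerate inputString.toList 0).foldl
    (fun (st : List Char × List Int) p =>
      if PySem.Chars.isalnum p.2 then
        (st.1 ++ [PySem.Chars.lowerChar p.2], st.2 ++ [p.1])
      else st)
    ([], [])
  (String.mk r.1, r.2)

-- midpoint bound used by pvGoB's termination proof
theorem pv_goB_dec {lo hi : Int} (h : ¬lo ≥ hi) (h1 : ¬hi - lo = 1) :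
    ((hi - PySem.Int.floordiv (lo + hi) 2).toNat < (hi - lo).toNat ∧
     (PySem.Int.floordiv (lo + hi) 2 - lo).toNat < (hi - lo).toNat) := by
  simp only [PySem.Int.floordiv]
  simp [Int.fdiv_eq_ediv]
  omega

-- ===== PORT B =====
-- B's helper go(lo, hi): divide and conquer on the index range.
-- inputString[lo] is ported with pyGetD (a totality default never reached: go is only
-- called with 0 ≤ lo < hi ≤ len, so the index is always in range, as in the Python).
def pvGoB (cs : List Char) (lo hi : Int) : List Char × List Int :=
  if lo ≥ hi then ([], [])
  else if hi - lo = 1 then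
    let c := PySem.List.pyGetD cs lo ' '
    if PySem.Chars.isalnum c then ([PySem.Chars.lowerChar c], [lo]) else ([], [])
  else
    let mid := PySem.Int.floordiv (lo + hi) 2
    let left := pvGoB cs lo mid
    let right := pvGoB cs mid hi
    (left.1 ++ right.1, left.2 ++ right.2)
termination_by (hi - lo).toNat
decreasing_by
  all_goals first
  | exact (pv_goB_dec ‹_› ‹_›).1
  | exact (pv_goB_dec ‹_› ‹_›).2

def preprocessTextWithMapping_alt (inputString : String) : String × List Int :=
  let r := pvGoB inputString.toList 0 (inputString.toList.length : Int)
  (String.mk r.1, r.2)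

-- ===== PRECONDITION & SPEC =====
def Spec_preprocessTextWithMapping (inputString : String) (out : String × List Int) : Prop := out = preprocessTextWithMapping_alt inputString
instance (inputString : String) (out : String × List Int) : Decidable (Spec_preprocessTextWithMapping inputString out) := by unfold Spec_preprocessTextWithMapping; infer_instance

-- ===== CLAIM (what is proved, stated in full; the proofs are below) =====
def Claim_equal_preprocessTextWithMapping : Prop := ∀ (inputString : String), Dom_preprocessTextWithMapping inputString → Spec_preprocessTextWithMapping inputString (preprocessTextWithMapping inputString)

-- ===== LEMMAS AND PROOFS =====

-- A's loop computes filter-then-map over the enumeration.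
theorem pv_loop_eq (l : List (Int × Char)) (a : List Char) (b : List Int) :
    l.foldl
      (fun (st : List Char × List Int) p =>
        if PySem.Chars.isalnum p.2 then
          (st.1 ++ [PySem.Chars.lowerChar p.2], st.2 ++ [p.1])
        else st)
      (a, b)
    = (a ++ (l.filter (fun p => PySem.Chars.isalnum p.2)).map (fun p => PySem.Chars.lowerChar p.2),
       b ++ (l.filter (fun p => PySem.Chars.isalnum p.2)).map (·.1)) := by
  induction l generalizing a b with
  | nil => simp
  | cons x xs ih =>
    by_cases h : PySem.Chars.isalnum x.2 <;>
      simp [List.foldl_cons, h, ih]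

-- B's divide and conquer computes the same filter-then-map over the index range.
theorem pvGoB_eq (cs : List Char) (lo hi : Int) (h0 : 0 ≤ lo) (h1 : hi ≤ (cs.length : Int)) :
    pvGoB cs lo hi =
      (((PySem.List.pyRange lo hi 1).filter
          (fun i => PySem.Chars.isalnum (PySem.List.pyGetD cs i ' '))).map
          (fun i => PySem.Chars.lowerChar (PySem.List.pyGetD cs i ' ')),
       (PySem.List.pyRange lo hi 1).filter
          (fun i => PySem.Chars.isalnum (PySem.List.pyGetD cs i ' '))) := by
  rw [pvGoB]
  by_cases hle : lo ≥ hi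
  · simp [hle, PySem.List.pyRange_one_eq_nil hle]
  · by_cases hone : hi - lo = 1
    · have hhi : hi = lo + 1 := by omega
      subst hhi
      simp [hle, PySem.List.pyRange_one_singleton]
      split_ifs with h <;> simp [h]
    · have hmlt : lo < hi := by omega
      have hmid : PySem.Int.floordiv (lo + hi) 2 = (lo + hi).fdiv 2 := rfl
      set mid := PySem.Int.floordiv (lo + hi) 2 with hm
      have hb : lo < mid ∧ mid < hi := by
        rw [hm]; simp only [PySem.Int.floordiv]; simp [Int.fdiv_eq_ediv]; omega
      have ihl := pvGoB_eq cs lo mid h0 (by omega)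
      have ihr := pvGoB_eq cs mid hi (by omega) h1
      simp only [hle, if_false, hone, if_false]
      rw [PySem.List.pyRange_one_append lo mid hi (by omega) (by omega),
        List.filter_append, List.map_append]
      simp [ihl, ihr]
termination_by (hi - lo).toNat
decreasing_by
  all_goals first
  | exact (pv_goB_dec ‹_› ‹_›).1
  | exact (pv_goB_dec ‹_› ‹_›).2

theorem preprocessTextWithMapping_spec : Claim_equal_preprocessTextWithMapping := by
  unfold Claim_equal_preprocessTextWithMapping
  intro s _
  unfold Spec_preprocessTextWithMapping preprocessTextWithMapping preprocessTextWithMapping_alt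
  rw [pvGoB_eq s.toList 0 (s.toList.length : Int) le_rfl le_rfl]
  simp only [pv_loop_eq, List.nil_append,
    PySem.List.enumerate_eq_map_pyRange s.toList ' ', List.filter_map, List.map_map]
  simp [Function.comp_def, PySem.List.len]
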